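-- pv_equiv track=rewrite | github.com/bubthegreat/cisco_mock_cli | cisco_mock_cli.py | get_command_dict
-- ===== SOURCE A (Python) =====
-- from collections import defaultdict
--
-- def get_command_dict(raw_log):
--     """Get a dict of commands from the logfileself.
--     Arguments:
--         raw_log (FileObj): Cisco logfile to mock CLI fromself.
--     Returns:
--         command_dict (dict): Cisco commands for keys with list of command result lines for values.
--     """
--     command_dict = defaultdict(list)
--     command = None
--     for line in raw_log:
--         if "`show" in line:
--             # Some lines may have output from a previous line that doesn't have a newline
--             # character, so we split on our command start/end backtick, and take the second
--             # element - that should be our command.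
--             command = line.strip().split('`')[1]
--             continue
--         if command:
--             command_dict[command].append(line.strip())
--     return command_dict
-- ===== SOURCE B (Python) =====
-- def get_command_dict(raw_log):
--     """Group the log into per-command segments, then merge segments into a dict."""
--     # Phase 1: chunk the lines into segments, each starting at a '`show' marker line.
--     segments = []
--     for line in raw_log:
--         if "`show" in line:
--             segments.append([line])
--         elif segments:
--             segments[-1].append(line)
--     # Phase 2: merge each segment's stripped body under its command name.
--     result = {}
--     for seg in segments:
--         command = seg[0].strip().split('`')[1]
--         body = [line.strip() for line in seg[1:]]
--         if command and body:
--             result.setdefault(command, []).extend(body)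
--     return result
-- ===== Notes on version B (the rewrite author's own statement) =====
-- stated objective: alternative
-- what changed: B first chunks the log into marker-delimited segments (phase 1) and then merges each whole segment's stripped body into the dict with setdefault/extend (phase 2), instead of A's single pass that mutates the dict line by line under a current-command state variable.
import Mathlib
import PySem

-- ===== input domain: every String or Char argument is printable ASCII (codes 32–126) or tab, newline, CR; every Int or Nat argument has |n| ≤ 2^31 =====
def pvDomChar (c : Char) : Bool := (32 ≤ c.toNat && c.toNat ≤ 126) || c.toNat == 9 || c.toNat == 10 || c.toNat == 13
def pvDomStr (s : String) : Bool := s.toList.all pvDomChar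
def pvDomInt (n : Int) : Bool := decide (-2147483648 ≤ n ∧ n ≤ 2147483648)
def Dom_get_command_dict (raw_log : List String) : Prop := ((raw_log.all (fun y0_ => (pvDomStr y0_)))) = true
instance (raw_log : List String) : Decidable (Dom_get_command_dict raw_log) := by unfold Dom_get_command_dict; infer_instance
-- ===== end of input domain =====

-- B groups the log into marker-delimited segments first and then merges whole segments into the
-- dict (setdefault/extend), instead of A's single pass that mutates the dict line by line
-- under a current-command state variable. Objective: alternative decomposition, same cost.

-- ===== PORT A =====
-- line.strip().split('`')[1] — index 1 always exists here because the line contains '`show',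
-- hence at least one backtick (stripping removes only whitespace); the .getD "" is unreachable.
def pvCmdOf (line : String) : String :=
  (PySem.List.pyGet? ((PySem.Str.split? (PySem.Str.strip line) "`").getD []) 1).getD ""

def pvStepA (st : PySem.Dict String (List String) × Option String) (line : String) :
    PySem.Dict String (List String) × Option String :=
  if PySem.Str.isIn "`show" line then (st.1, some (pvCmdOf line))
  else match st.2 with                       -- `if command:` — truthy = not None and not ""
    | some c => if c ≠ "" then (st.1.modify c [] (· ++ [PySem.Str.strip line]), st.2) else st
    | none => st

def get_command_dict (raw_log : List String) : List (String × List String) :=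
  (raw_log.foldl pvStepA (PySem.Dict.empty, none)).1.items

-- ===== PORT B =====
def pvStepSeg (segs : List (List String)) (line : String) : List (List String) :=
  if PySem.Str.isIn "`show" line then segs ++ [[line]]
  else if segs.isEmpty then segs
  else segs.dropLast ++ [segs.getLast! ++ [line]]

def pvMerge (d : PySem.Dict String (List String)) (seg : List String) :
    PySem.Dict String (List String) :=
  let command := pvCmdOf (seg.headD "")      -- seg[0]; every segment is nonempty by construction
  let body := (seg.drop 1).map PySem.Str.strip
  if command ≠ "" ∧ body ≠ [] then d.modify command [] (· ++ body) else d

def get_command_dict_alt (raw_log : List String) : List (String × List String) :=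
  ((raw_log.foldl pvStepSeg []).foldl pvMerge PySem.Dict.empty).items

-- ===== PRECONDITION & SPEC =====
def Spec_get_command_dict (raw_log : List String) (out : List (String × List String)) : Prop := out = get_command_dict_alt raw_log
instance (raw_log : List String) (out : List (String × List String)) : Decidable (Spec_get_command_dict raw_log out) := by unfold Spec_get_command_dict; infer_instance

-- ===== CLAIM (what is proved, stated in full; the proofs are below) =====
def Claim_equal_get_command_dict : Prop := ∀ (raw_log : List String), Dom_get_command_dict raw_log → Spec_get_command_dict raw_log (get_command_dict raw_log)

-- ===== LEMMAS AND PROOFS =====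

def pvNm (line : String) : Bool := !PySem.Str.isIn "`show" line

-- the segments B's first phase produces, characterised recursively
def pvChunks : List String → List (List String)
  | [] => []
  | l :: ls =>
    if PySem.Str.isIn "`show" l then
      (l :: ls.takeWhile pvNm) :: pvChunks (ls.dropWhile pvNm)
    else pvChunks ls
termination_by ls => ls.length
decreasing_by
  · exact Nat.lt_succ_of_le (List.length_dropWhile_le _ _)
  · exact Nat.lt_succ_self _

theorem pvIsInChars {l : String} {b : Bool} (h : PySem.Str.isIn "`show" l = b) :
    PySem.Chars.isIn ['`', 's', 'h', 'o', 'w'] l.toList = b := by simpa using h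

theorem pvChunks_nil : pvChunks [] = [] := by rw [pvChunks]

theorem pvChunks_cons_pos {l : String} (ls : List String)
    (h : PySem.Str.isIn "`show" l = true) :
    pvChunks (l :: ls) = (l :: ls.takeWhile pvNm) :: pvChunks (ls.dropWhile pvNm) := by
  rw [pvChunks, if_pos h]

theorem pvChunks_cons_neg {l : String} (ls : List String)
    (h : PySem.Str.isIn "`show" l = false) :
    pvChunks (l :: ls) = pvChunks ls := by
  rw [pvChunks, if_neg (by simp [pvIsInChars h])]

theorem pvTakeWhile_cons_pos {l : String} (ls : List String)
    (h : PySem.Str.isIn "`show" l = true) :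
    (l :: ls).takeWhile pvNm = [] := by
  rw [List.takeWhile_cons, if_neg (by simp [pvNm, pvIsInChars h])]

theorem pvDropWhile_cons_pos {l : String} (ls : List String)
    (h : PySem.Str.isIn "`show" l = true) :
    (l :: ls).dropWhile pvNm = l :: ls := by
  rw [List.dropWhile_cons, if_neg (by simp [pvNm, pvIsInChars h])]

theorem pvTakeWhile_cons_neg {l : String} (ls : List String)
    (h : PySem.Str.isIn "`show" l = false) :
    (l :: ls).takeWhile pvNm = l :: ls.takeWhile pvNm := by
  rw [List.takeWhile_cons, if_pos (by simp [pvNm, pvIsInChars h])]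

theorem pvDropWhile_cons_neg {l : String} (ls : List String)
    (h : PySem.Str.isIn "`show" l = false) :
    (l :: ls).dropWhile pvNm = ls.dropWhile pvNm := by
  rw [List.dropWhile_cons, if_pos (by simp [pvNm, pvIsInChars h])]

theorem pvGetLast!_concat (acc : List (List String)) (cur : List String) :
    (acc ++ [cur]).getLast! = cur := by
  induction acc with
  | nil => rfl
  | cons a t ih => simp [List.getLast!, ih]

theorem pvPhase1_acc (ls : List String) : ∀ (acc : List (List String)) (cur : List String),
    (ls.foldl pvStepSeg (acc ++ [cur])) =
      acc ++ [cur ++ ls.takeWhile pvNm] ++ pvChunks (ls.dropWhile pvNm) := by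
  induction ls with
  | nil => intro acc cur; simp [pvChunks_nil]
  | cons l ls ih =>
    intro acc cur
    rcases hb : PySem.Str.isIn "`show" l with _ | _
    · rw [List.foldl_cons, pvStepSeg, if_neg (by simp [pvIsInChars hb])]
      rw [show (acc ++ [cur]).isEmpty = false by simp]
      simp only [Bool.false_eq_true, if_false, List.dropLast_concat, pvGetLast!_concat]
      rw [ih acc (cur ++ [l]), pvTakeWhile_cons_neg ls hb, pvDropWhile_cons_neg ls hb]
      simp
    · rw [List.foldl_cons, pvStepSeg, if_pos hb]
      rw [show acc ++ [cur] ++ [[l]] = (acc ++ [cur]) ++ [[l]] by simp]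
      rw [ih (acc ++ [cur]) [l], pvTakeWhile_cons_pos ls hb, pvDropWhile_cons_pos ls hb,
        pvChunks_cons_pos ls hb]
      simp

theorem pvPhase1 (ls : List String) : ls.foldl pvStepSeg [] = pvChunks ls := by
  induction ls with
  | nil => rw [pvChunks_nil]; rfl
  | cons l ls ih =>
    rcases hb : PySem.Str.isIn "`show" l with _ | _
    · rw [List.foldl_cons, pvStepSeg, if_neg (by simp [pvIsInChars hb])]
      rw [show (List.nil (α := List String)).isEmpty = true by rfl]
      simp only [if_true]
      rw [ih, pvChunks_cons_neg ls hb]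
    · rw [List.foldl_cons, pvStepSeg, if_pos hb, List.nil_append]
      have := pvPhase1_acc ls [] [l]
      simp only [List.nil_append] at this
      rw [this, pvChunks_cons_pos ls hb]
      simp

-- folding single-line appends over a body equals one modify with the whole body (or nothing)
theorem pvExtFold (xs : List String) : ∀ (d : PySem.Dict String (List String)) (c : String),
    xs.foldl (fun d x => d.modify c [] (· ++ [PySem.Str.strip x])) d =
      if xs = [] then d else d.modify c [] (· ++ xs.map PySem.Str.strip) := by
  induction xs with
  | nil => intro d c; simp
  | cons x xs ih =>
    intro d c
    simp only [List.foldl_cons, ih, List.map_cons, reduceCtorEq, if_false]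
    by_cases hx : xs = []
    · simp [hx]
    · simp only [hx, if_false]
      simp only [PySem.Dict.modify, PySem.Dict.getD_insert_self, PySem.Dict.insert_insert_self,
        List.append_assoc, List.singleton_append]

-- one non-marker line, under command state c, as seen by A
def pvAppOne (c : Option String) (d : PySem.Dict String (List String)) (x : String) :
    PySem.Dict String (List String) :=
  match c with
  | some c' => if c' ≠ "" then d.modify c' [] (· ++ [PySem.Str.strip x]) else d
  | none => d

-- with no current command (None or "") A leaves the dict unchanged
theorem pvFoldAppOne_none (xs : List String) : ∀ d : PySem.Dict String (List String),
    xs.foldl (pvAppOne none) d = d := by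
  induction xs with
  | nil => intro d; rfl
  | cons x xs ih => intro d; exact ih d

theorem pvFoldAppOne_empty (xs : List String) : ∀ d : PySem.Dict String (List String),
    xs.foldl (pvAppOne (some "")) d = d := by
  induction xs with
  | nil => intro d; rfl
  | cons x xs ih =>
    intro d
    rw [List.foldl_cons, show pvAppOne (some "") d x = d by simp [pvAppOne]]
    exact ih d

-- merging one whole chunk = A's per-line appends under that chunk's command
theorem pvMergeChunk (l : String) (tw : List String) (d : PySem.Dict String (List String)) :
    pvMerge d (l :: tw) = tw.foldl (pvAppOne (some (pvCmdOf l))) d := by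
  by_cases hc : pvCmdOf l = ""
  · rw [show pvMerge d (l :: tw) = d by
      simp only [pvMerge, List.headD_cons, List.drop_one, List.tail_cons]
      rw [if_neg (by simp [hc])]]
    rw [hc, pvFoldAppOne_empty tw d]
  · have hfun : pvAppOne (some (pvCmdOf l)) =
        fun d x => d.modify (pvCmdOf l) [] (· ++ [PySem.Str.strip x]) := by
      funext d x; simp [pvAppOne, hc]
    rw [hfun, pvExtFold]
    simp only [pvMerge, List.headD_cons, List.drop_one, List.tail_cons]
    cases tw with
    | nil => rw [if_pos rfl, if_neg (by simp)]
    | cons t ts => rw [if_neg (show ¬(t :: ts = []) by simp),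
        if_pos (show pvCmdOf l ≠ "" ∧ (t :: ts).map PySem.Str.strip ≠ [] by simp [hc])]

theorem pvChunks_dropWhile (ls : List String) :
    pvChunks (ls.dropWhile pvNm) = pvChunks ls := by
  induction ls with
  | nil => rfl
  | cons l ls ih =>
    rcases hb : PySem.Str.isIn "`show" l with _ | _
    · rw [pvDropWhile_cons_neg ls hb, pvChunks_cons_neg ls hb, ih]
    · rw [pvDropWhile_cons_pos ls hb]

-- running A over the lines = merging the chunks, for any dict and command state
theorem pvMain (ls : List String) : ∀ (d : PySem.Dict String (List String)) (c : Option String),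
    (ls.foldl pvStepA (d, c)).1 =
      (pvChunks ls).foldl pvMerge ((ls.takeWhile pvNm).foldl (pvAppOne c) d) := by
  induction ls with
  | nil => intro d c; rw [pvChunks_nil]; rfl
  | cons l ls ih =>
    intro d c
    rcases hb : PySem.Str.isIn "`show" l with _ | _
    · -- non-marker line: A appends (or not), the chunk structure is unchanged
      rw [List.foldl_cons, pvStepA, if_neg (by simp [pvIsInChars hb])]
      have hstep : (match (d, c).2 with
          | some c' => if c' ≠ "" then ((d, c).1.modify c' [] (· ++ [PySem.Str.strip l]), (d, c).2)
                       else (d, c)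
          | none => (d, c)) = (pvAppOne c d l, c) := by
        cases c with
        | none => rfl
        | some c' => by_cases hcc : c' = "" <;> simp [pvAppOne, hcc]
      rw [hstep, ih (pvAppOne c d l) c, pvTakeWhile_cons_neg ls hb, pvChunks_cons_neg ls hb,
        List.foldl_cons]
    · -- marker line: a new chunk starts; its merge equals A's appends under the new command
      rw [List.foldl_cons, pvStepA, if_pos hb]
      have : ((d, c).1, some (pvCmdOf l)) = (d, some (pvCmdOf l)) := rfl
      rw [this, ih d (some (pvCmdOf l)), pvTakeWhile_cons_pos ls hb, pvChunks_cons_pos ls hb,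
        List.foldl_nil, List.foldl_cons, pvMergeChunk, pvChunks_dropWhile]

-- ===== VERDICT (by name: the statement is the Claim_ definition above) =====
theorem get_command_dict_spec : Claim_equal_get_command_dict := by
  intro raw_log _
  unfold Spec_get_command_dict get_command_dict get_command_dict_alt
  rw [pvPhase1, pvMain, pvFoldAppOne_none]
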